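-- pv_equiv track=rewrite | github.com/fc-0808/ETSY_listings_automation | src/ai_generator.py | _derive_style_mapping
-- ===== SOURCE A (Python) =====
-- def _derive_style_mapping(image_analysis: list[dict]) -> dict[str, list[int]]:
--     """
--     Algorithmically build style → [1-based image indices] mapping.
--
--     Index 1 is the thumbnail — always excluded from linked images.
--     Edge/profile shots go to 'Case Only (edge)' as low-priority fallback.
--     Within each style, indices are sorted best-quality-first so the image at
--     position [0] — the one Shop Uploader links — is always the sharpest shot.
--     Sort key: thumbnail_quality DESC, then index ASC (earlier upload wins ties).
--     """
--     mapping: dict[str, list[int]] = {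
--         "Case+Grip+Charm": [], "Case+Grip": [], "Case+Charm": [],
--         "Case Only": [], "Case Only (edge)": [], "Grip Only": [], "Charm Only": [],
--     }
--
--     # Build quality lookup keyed by 1-based image index
--     quality: dict[int, int] = {
--         int(img.get("index", 0)): int(img.get("thumbnail_quality", 5))
--         for img in image_analysis
--     }
--
--     for img in image_analysis:
--         idx       = int(img.get("index", 0))
--         if idx < 2:   # index 1 is thumbnail — never link it
--             continue
--         has_grip  = bool(img.get("has_grip",  False))
--         has_charm = bool(img.get("has_charm", False))
--         has_case  = bool(img.get("has_case",  True))
--         edge      = bool(img.get("is_edge_or_profile", False))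
--
--         if has_case:
--             if has_grip and has_charm:
--                 mapping["Case+Grip+Charm"].append(idx)
--             elif has_grip:
--                 mapping["Case+Grip"].append(idx)
--             elif has_charm:
--                 mapping["Case+Charm"].append(idx)
--             elif edge:
--                 mapping["Case Only (edge)"].append(idx)
--             else:
--                 mapping["Case Only"].append(idx)
--         elif has_grip:
--             mapping["Grip Only"].append(idx)
--         # standalone charm (no case, no grip) — never linked
--
--     mapping["Charm Only"] = []  # always empty per Etsy/Shop Uploader rules
--
--     # Sort each style's list: best thumbnail_quality first, ties broken by lower index
--     for style in mapping:
--         mapping[style].sort(key=lambda i: (-quality.get(i, 5), i))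
--
--     return mapping
-- ===== SOURCE B (Python) =====
-- def _derive_style_mapping(image_analysis: list[dict]) -> dict[str, list[int]]:
--     """Same mapping as A, built in one pass over a single globally sorted list:
--     classification is factored into a style_of key function and the per-bucket
--     sorts disappear because the stable global sort already orders every bucket."""
--     styles = ("Case+Grip+Charm", "Case+Grip", "Case+Charm",
--               "Case Only", "Case Only (edge)", "Grip Only", "Charm Only")
--
--     quality = {int(img.get("index", 0)): int(img.get("thumbnail_quality", 5))
--                for img in image_analysis}
--
--     def style_of(img):
--         if int(img.get("index", 0)) < 2:
--             return None  # index 1 is the thumbnail — never linked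
--         has_grip = bool(img.get("has_grip", False))
--         has_charm = bool(img.get("has_charm", False))
--         if bool(img.get("has_case", True)):
--             if has_grip:
--                 return "Case+Grip+Charm" if has_charm else "Case+Grip"
--             if has_charm:
--                 return "Case+Charm"
--             return "Case Only (edge)" if bool(img.get("is_edge_or_profile", False)) else "Case Only"
--         return "Grip Only" if has_grip else None
--
--     def sort_key(img):
--         i = int(img.get("index", 0))
--         return (-quality.get(i, 5), i)
--
--     mapping = {s: [] for s in styles}
--     for img in sorted(image_analysis, key=sort_key):
--         s = style_of(img)
--         if s is not None:
--             mapping[s].append(int(img.get("index", 0)))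
--     return mapping
-- ===== Notes on version B (the rewrite author's own statement) =====
-- stated objective: alternative
-- what changed: B sorts the whole image list once (stably, by the same (-quality, index) key) and dispatches each image into its bucket via a factored-out style_of key function, so the seven per-bucket sorts of A disappear; buckets come out sorted because the global sort is stable and the key is injective in the index.
import Mathlib
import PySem

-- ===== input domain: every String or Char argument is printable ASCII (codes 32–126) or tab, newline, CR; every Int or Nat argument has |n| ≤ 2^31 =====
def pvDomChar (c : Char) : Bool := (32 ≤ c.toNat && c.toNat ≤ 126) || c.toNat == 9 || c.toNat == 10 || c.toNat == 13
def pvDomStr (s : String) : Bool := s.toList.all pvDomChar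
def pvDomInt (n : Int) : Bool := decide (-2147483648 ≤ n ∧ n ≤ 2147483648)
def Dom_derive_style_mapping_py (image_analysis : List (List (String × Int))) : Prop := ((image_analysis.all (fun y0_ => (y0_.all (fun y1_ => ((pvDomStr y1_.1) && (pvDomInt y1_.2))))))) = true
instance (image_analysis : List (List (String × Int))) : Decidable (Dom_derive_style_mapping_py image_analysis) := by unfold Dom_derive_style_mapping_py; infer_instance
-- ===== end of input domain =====

-- B replaces A's seven per-bucket sorts by one stable global sort of the image list plus a
-- style_of key function dispatching each image into its bucket (objective: alternative decomposition).


-- img.get(key, dflt) on a per-image dict (used by both Pythons)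
def pvGet (img : List (String × Int)) (k : String) (d : Int) : Int :=
  (PySem.Dict.mk img).getD k d

def pvQuality (xs : List (List (String × Int))) : PySem.Dict Int Int :=
  xs.foldl (fun d img => d.insert (pvGet img "index" 0) (pvGet img "thumbnail_quality" 5)) PySem.Dict.empty

-- ===== PORT A =====
-- body of A's classification loop, branch for branch
def pvStepA (m : PySem.Dict String (List Int)) (img : List (String × Int)) : PySem.Dict String (List Int) :=
  let idx := pvGet img "index" 0
  if idx < 2 then m
  else
    let has_grip  := pvGet img "has_grip" 0 != 0
    let has_charm := pvGet img "has_charm" 0 != 0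
    let has_case  := pvGet img "has_case" 1 != 0
    let edge      := pvGet img "is_edge_or_profile" 0 != 0
    if has_case then
      if has_grip && has_charm then m.modify "Case+Grip+Charm" [] (· ++ [idx])
      else if has_grip then m.modify "Case+Grip" [] (· ++ [idx])
      else if has_charm then m.modify "Case+Charm" [] (· ++ [idx])
      else if edge then m.modify "Case Only (edge)" [] (· ++ [idx])
      else m.modify "Case Only" [] (· ++ [idx])
    else if has_grip then m.modify "Grip Only" [] (· ++ [idx])
    else m

def derive_style_mapping_py (image_analysis : List (List (String × Int))) : List (String × List Int) :=
  let mapping0 : PySem.Dict String (List Int) := PySem.Dict.ofList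
    [("Case+Grip+Charm", []), ("Case+Grip", []), ("Case+Charm", []),
     ("Case Only", []), ("Case Only (edge)", []), ("Grip Only", []), ("Charm Only", [])]
  let quality := pvQuality image_analysis
  let mapping1 := image_analysis.foldl pvStepA mapping0
  let mapping2 := mapping1.insert "Charm Only" []
  let mapping3 := mapping2.keys.foldl
    (fun m s => m.insert s (PySem.List.sorted2 (m.getD s []) (fun i => -(quality.getD i 5)) (fun i => i))) mapping2
  mapping3.items

-- ===== PORT B =====
-- B's style_of(img): the bucket name, or none for skipped images
def pvStyleOf (img : List (String × Int)) : Option String :=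
  if pvGet img "index" 0 < 2 then none
  else
    let has_grip  := pvGet img "has_grip" 0 != 0
    let has_charm := pvGet img "has_charm" 0 != 0
    if pvGet img "has_case" 1 != 0 then
      if has_grip then (if has_charm then some "Case+Grip+Charm" else some "Case+Grip")
      else if has_charm then some "Case+Charm"
      else if pvGet img "is_edge_or_profile" 0 != 0 then some "Case Only (edge)" else some "Case Only"
    else if has_grip then some "Grip Only" else none

def pvStepB (m : PySem.Dict String (List Int)) (img : List (String × Int)) : PySem.Dict String (List Int) :=
  match pvStyleOf img with
  | some s => m.modify s [] (· ++ [pvGet img "index" 0])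
  | none => m

def derive_style_mapping_py_alt (image_analysis : List (List (String × Int))) : List (String × List Int) :=
  let quality := pvQuality image_analysis
  let sortedImgs := PySem.List.sorted2 image_analysis
    (fun img => -(quality.getD (pvGet img "index" 0) 5)) (fun img => pvGet img "index" 0)
  let mapping := sortedImgs.foldl pvStepB (PySem.Dict.ofList
    [("Case+Grip+Charm", []), ("Case+Grip", []), ("Case+Charm", []),
     ("Case Only", []), ("Case Only (edge)", []), ("Grip Only", []), ("Charm Only", [])])
  mapping.items

-- ===== PRECONDITION & SPEC =====
def Spec_derive_style_mapping_py (image_analysis : List (List (String × Int))) (out : List (String × List Int)) : Prop := out = derive_style_mapping_py_alt image_analysis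
instance (image_analysis : List (List (String × Int))) (out : List (String × List Int)) : Decidable (Spec_derive_style_mapping_py image_analysis out) := by unfold Spec_derive_style_mapping_py; infer_instance

-- ===== CLAIM (what is proved, stated in full; the proofs are below) =====
def Claim_equal_derive_style_mapping_py : Prop := ∀ (image_analysis : List (List (String × Int))), Dom_derive_style_mapping_py image_analysis → Spec_derive_style_mapping_py image_analysis (derive_style_mapping_py image_analysis)

-- ===== LEMMAS AND PROOFS =====

theorem pvStepA_eq_pvStepB (m : PySem.Dict String (List Int)) (img : List (String × Int)) :
    pvStepA m img = pvStepB m img := by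
  simp only [pvStepA, pvStepB, pvStyleOf]
  by_cases hi : pvGet img "index" 0 < 2 <;>
    cases hca : (pvGet img "has_case" 1 != 0) <;>
    cases hg : (pvGet img "has_grip" 0 != 0) <;>
    cases hc : (pvGet img "has_charm" 0 != 0) <;>
    cases he : (pvGet img "is_edge_or_profile" 0 != 0) <;>
    simp [hi, hca, hg, hc, he]




def pvPairs (xs : List (List (String × Int))) : List (String × Int) :=
  xs.filterMap (fun img => (pvStyleOf img).map (fun s => (s, pvGet img "index" 0)))

def pvKeys7 : List String :=
  ["Case+Grip+Charm", "Case+Grip", "Case+Charm", "Case Only", "Case Only (edge)", "Grip Only", "Charm Only"]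

theorem pvFoldB_eq_modify (xs : List (List (String × Int))) (d : PySem.Dict String (List Int)) :
    xs.foldl pvStepB d = (pvPairs xs).foldl (fun d p => d.modify p.1 [] fun x => x ++ [p.2]) d := by
  induction xs generalizing d with
  | nil => rfl
  | cons x xs ih =>
    cases h : pvStyleOf x <;>
      simp [pvPairs, h, List.foldl_cons, ih, pvStepB]

theorem pvPairs_filter_map (xs : List (List (String × Int))) (c : String) :
    ((pvPairs xs).filter (fun p => p.1 == c)).map (fun x => x.2)
      = (xs.filter (fun img => pvStyleOf img == some c)).map (fun img => pvGet img "index" 0) := by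
  simp only [pvPairs]
  induction xs with
  | nil => rfl
  | cons x xs ih =>
    cases h : pvStyleOf x with
    | none => simp [h, ih]
    | some s =>
      by_cases hc : s = c <;>
        simp [h, hc, ih]

theorem pvStyleOf_mem_keys7 (img : List (String × Int)) (s : String) (h : pvStyleOf img = some s) :
    s ∈ pvKeys7 := by
  simp only [pvStyleOf] at h
  split_ifs at h <;> simp_all [pvKeys7]

theorem pvStyleOf_ne_charm (img : List (String × Int)) : pvStyleOf img ≠ some "Charm Only" := by
  simp only [pvStyleOf]
  split_ifs <;> simp

theorem pvSet_update_self (s : PySem.Set String) (l : List String) (h : ∀ y ∈ l, y ∈ s) :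
    PySem.Set.update s l = s := by
  rw [PySem.Set.update_eq_append_filter]
  have hfil : List.filter (fun y => !s.contains y) (PySem.Set.ofList l) = [] := by
    rw [List.filter_eq_nil_iff]
    intro a ha
    simpa using h a ((PySem.Set.mem_ofList l a).1 ha)
  rw [hfil, List.append_nil]

theorem sorted2_eq_sorted_lex {α : Type} (xs : List α) (k1 k2 : α → Int) :
    PySem.List.sorted2 xs k1 k2 = PySem.List.sorted xs (fun a => (toLex (k1 a, k2 a) : Int ×ₗ Int)) := by
  unfold PySem.List.sorted2 PySem.List.sorted
  have hbf : (fun a b => decide (k1 a < k1 b) || (!decide (k1 b < k1 a) && decide (k2 a < k2 b)))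
      = (fun a b : α => decide ((toLex (k1 a, k2 a) : Int ×ₗ Int) < toLex (k1 b, k2 b))) := by
    funext a b
    rcases lt_trichotomy (k1 a) (k1 b) with h | h | h
    · simp [Prod.Lex.toLex_lt_toLex, h, lt_asymm h]
    · simp [Prod.Lex.toLex_lt_toLex, h]
    · simp [Prod.Lex.toLex_lt_toLex, lt_asymm h, ne_of_gt h]; omega
  simp only [hbf]
  rfl

theorem pvBucket_sorted2 {α : Type} (xs : List α) (p : α → Bool) (f : α → Int) (k : Int → Int) :
    PySem.List.sorted2 ((xs.filter p).map f) k (fun i => i)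
      = ((PySem.List.sorted2 xs (fun a => k (f a)) (fun a => f a)).filter p).map f := by
  rw [sorted2_eq_sorted_lex, sorted2_eq_sorted_lex]
  have hinj : Function.Injective (fun i : Int => (toLex (k i, i) : Int ×ₗ Int)) := by
    intro a b h
    simpa using congrArg (fun q : Int ×ₗ Int => (ofLex q).2) h
  apply PySem.List.eq_of_perm_of_pairwise_le_of_injective
    (key := fun i : Int => (toLex (k i, i) : Int ×ₗ Int)) hinj
  · exact (PySem.List.sorted_perm _ _ _).trans
      ((((PySem.List.sorted_perm xs _ false).filter p).map f).symm)
  · exact PySem.List.sorted_pairwise _ _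
  · rw [List.pairwise_map]
    exact (PySem.List.sorted_pairwise xs (fun a => (toLex (k (f a), f a) : Int ×ₗ Int))).sublist
      List.filter_sublist

theorem pvPairs_fst_mem (xs : List (List (String × Int))) (y : String)
    (hy : y ∈ (pvPairs xs).map (fun p => p.1)) : y ∈ pvKeys7 := by
  rcases List.mem_map.1 hy with ⟨p, hp, rfl⟩
  rcases List.mem_filterMap.1 hp with ⟨img, _, himg⟩
  cases h : pvStyleOf img with
  | none => rw [h] at himg; simp at himg
  | some s =>
    rw [h] at himg
    simp only [Option.map_some, Option.some.injEq] at himg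
    have hs := pvStyleOf_mem_keys7 img s h
    rw [← himg]
    simpa using hs

theorem pvFold_keys (xs : List (List (String × Int))) (d : PySem.Dict String (List Int))
    (hd : d.keys = pvKeys7) : (xs.foldl pvStepB d).keys = pvKeys7 := by
  rw [pvFoldB_eq_modify]
  have h := PySem.Dict.keys_foldl_modify_key (pvPairs xs) (fun p => p.1) ([] : List Int)
      (fun _ p => fun x => x ++ [p.2]) d
  rw [h, hd]
  exact pvSet_update_self _ _ (fun y hy => pvPairs_fst_mem xs y hy)

theorem pvMain_eq (xs : List (List (String × Int))) :
    derive_style_mapping_py xs = derive_style_mapping_py_alt xs := by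
  have hstep : pvStepA = pvStepB := funext fun m => funext fun img => pvStepA_eq_pvStepB m img
  simp only [derive_style_mapping_py, derive_style_mapping_py_alt, hstep]
  set M0 : PySem.Dict String (List Int) := PySem.Dict.ofList
    [("Case+Grip+Charm", []), ("Case+Grip", []), ("Case+Charm", []),
     ("Case Only", []), ("Case Only (edge)", []), ("Grip Only", []), ("Charm Only", [])] with hM0
  have hM0k : M0.keys = pvKeys7 := by rw [hM0]; decide
  set q := pvQuality xs with hq
  set ys := PySem.List.sorted2 xs (fun img => -(q.getD (pvGet img "index" 0) 5))
      (fun img => pvGet img "index" 0) with hys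
  -- A side
  have hk1 : (xs.foldl pvStepB M0).keys = pvKeys7 := pvFold_keys xs M0 hM0k
  have hcont : (xs.foldl pvStepB M0).contains "Charm Only" = true := by
    rw [PySem.Dict.contains_iff_mem_keys, hk1]; decide
  have hM0g : ∀ c, M0.getD c ([] : List Int) = [] := by
    intro c
    have h : M0 = PySem.Dict.mk [("Case+Grip+Charm", []), ("Case+Grip", []), ("Case+Charm", []),
        ("Case Only", []), ("Case Only (edge)", []), ("Grip Only", []), ("Charm Only", [])] := by
      rw [hM0]; decide
    rw [h, PySem.Dict.getD_eq_get?_getD]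
    simp only [PySem.Dict.get?_mk_cons]
    split_ifs <;> rfl
  have hgd : ∀ (zs : List (List (String × Int))) (c : String),
      (zs.foldl pvStepB M0).getD c [] =
        (zs.filter (fun img => pvStyleOf img == some c)).map (fun img => pvGet img "index" 0) := by
    intro zs c
    rw [pvFoldB_eq_modify, PySem.Dict.getD_foldl_modify_append, pvPairs_filter_map, hM0g,
      List.nil_append]
  have hk2 : ((xs.foldl pvStepB M0).insert "Charm Only" ([] : List Int)).keys = pvKeys7 := by
    rw [PySem.Dict.keys_insert_of_contains _ _ hcont, hk1]
  rw [hk2]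
  have hk3 : (pvKeys7.foldl (fun m s => m.insert s
      (PySem.List.sorted2 (m.getD s []) (fun i => -(q.getD i 5)) (fun i => i)))
      ((xs.foldl pvStepB M0).insert "Charm Only" ([] : List Int))).keys = pvKeys7 := by
    rw [PySem.Dict.keys_foldl_insert, hk2]
    exact pvSet_update_self _ _ (fun y hy => hy)
  have hnod3 : (pvKeys7.foldl (fun m s => m.insert s
      (PySem.List.sorted2 (m.getD s []) (fun i => -(q.getD i 5)) (fun i => i)))
      ((xs.foldl pvStepB M0).insert "Charm Only" ([] : List Int))).keys.Nodup := by
    rw [hk3]; decide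
  have hkB : (ys.foldl pvStepB M0).keys = pvKeys7 := pvFold_keys ys M0 hM0k
  have hnodB : (ys.foldl pvStepB M0).keys.Nodup := by rw [hkB]; decide
  rw [PySem.Dict.items_eq_map_keys _ hnod3 [], PySem.Dict.items_eq_map_keys _ hnodB [], hk3, hkB]
  apply List.map_congr_left
  intro c hc
  simp only [Prod.mk.injEq, true_and]
  have hget2 : ∀ c, ((xs.foldl pvStepB M0).insert "Charm Only" ([] : List Int)).getD c [] =
      if c = "Charm Only" then [] else (xs.foldl pvStepB M0).getD c [] := by
    intro c; rw [PySem.Dict.getD_insert]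
  rw [hgd ys c]
  fin_cases hc
  · simp only [pvKeys7, List.foldl_cons, List.foldl_nil]
    simp only [PySem.Dict.getD_insert]
    norm_num [hget2, hgd xs]
    exact pvBucket_sorted2 xs (fun img => pvStyleOf img == some "Case+Grip+Charm")
      (fun img => pvGet img "index" 0) (fun i => -(q.getD i 5))
  · simp only [pvKeys7, List.foldl_cons, List.foldl_nil]
    simp only [PySem.Dict.getD_insert]
    norm_num [hget2, hgd xs]
    exact pvBucket_sorted2 xs (fun img => pvStyleOf img == some "Case+Grip")
      (fun img => pvGet img "index" 0) (fun i => -(q.getD i 5))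
  · simp only [pvKeys7, List.foldl_cons, List.foldl_nil]
    simp only [PySem.Dict.getD_insert]
    norm_num [hget2, hgd xs]
    exact pvBucket_sorted2 xs (fun img => pvStyleOf img == some "Case+Charm")
      (fun img => pvGet img "index" 0) (fun i => -(q.getD i 5))
  · simp only [pvKeys7, List.foldl_cons, List.foldl_nil]
    simp only [PySem.Dict.getD_insert]
    norm_num [hget2, hgd xs]
    exact pvBucket_sorted2 xs (fun img => pvStyleOf img == some "Case Only")
      (fun img => pvGet img "index" 0) (fun i => -(q.getD i 5))
  · simp only [pvKeys7, List.foldl_cons, List.foldl_nil]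
    simp only [PySem.Dict.getD_insert]
    norm_num [hget2, hgd xs]
    exact pvBucket_sorted2 xs (fun img => pvStyleOf img == some "Case Only (edge)")
      (fun img => pvGet img "index" 0) (fun i => -(q.getD i 5))
  · simp only [pvKeys7, List.foldl_cons, List.foldl_nil]
    simp only [PySem.Dict.getD_insert]
    norm_num [hget2, hgd xs]
    exact pvBucket_sorted2 xs (fun img => pvStyleOf img == some "Grip Only")
      (fun img => pvGet img "index" 0) (fun i => -(q.getD i 5))
  · simp only [pvKeys7, List.foldl_cons, List.foldl_nil]
    simp only [PySem.Dict.getD_insert]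
    norm_num [hget2]
    have hnil : ys.filter (fun img => pvStyleOf img == some "Charm Only") = [] := by
      rw [List.filter_eq_nil_iff]
      intro a _
      simpa using pvStyleOf_ne_charm a
    rw [hnil]
    rfl

-- ===== VERDICT (by name: the statement is the Claim_ definition above) =====
theorem derive_style_mapping_py_spec : Claim_equal_derive_style_mapping_py := by
  intro image_analysis _
  unfold Spec_derive_style_mapping_py
  exact pvMain_eq image_analysis
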